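-- pv_equiv track=rewrite | github.com/neal-logan/social-engineering-detection | analysis/analysis/schema.py | _alias_match
-- ===== SOURCE A (Python) =====
-- def _alias_match(
--     value: object,
--     aliases: dict[str, tuple[str, ...]],
-- ) -> str | None:
--     """Return the canonical key whose longest matched alias is in `value`.
--
--     Each canonical key (e.g. "by_book") maps to phrasings that may appear
--     in the rendered prompt text (e.g. "by-the-book", "follows policy").
--     We search across ALL aliases, sorted longest-first, and return the
--     canonical key associated with the first hit. This guarantees that
--     "by-the-book" wins over a shorter accidental substring like "book".
--     """
--     if value is None:
--         return None
--     text = str(value).lower()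
--     flat = sorted(
--         ((canonical, alias)
--          for canonical, al in aliases.items()
--          for alias in al),
--         key=lambda pa: -len(pa[1]),
--     )
--     for canonical, alias in flat:
--         if alias in text:
--             return canonical
--     return None
-- ===== SOURCE B (Python) =====
-- def _alias_match(
--     value: object,
--     aliases: dict[str, tuple[str, ...]],
-- ) -> str | None:
--     """Single linear pass: keep the longest matching alias seen so far.
--
--     Strict '>' means ties go to the earliest-inserted alias, which is
--     exactly the tie-break of the original stable longest-first sort.
--     """
--     if value is None:
--         return None
--     text = str(value).lower()
--     best_canonical = None
--     best_len = -1
--     for canonical, al in aliases.items():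
--         for alias in al:
--             if alias in text and len(alias) > best_len:
--                 best_canonical = canonical
--                 best_len = len(alias)
--     return best_canonical
-- ===== Notes on version B (the rewrite author's own statement) =====
-- stated objective: simpler
-- what changed: Replaces flatten-then-stable-sort-by-descending-length-then-first-hit with one linear pass over the aliases in insertion order keeping the longest match so far (strict '>' reproduces the stable sort's tie-break), so no flattened list is built and no sort is performed.
import Mathlib
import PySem

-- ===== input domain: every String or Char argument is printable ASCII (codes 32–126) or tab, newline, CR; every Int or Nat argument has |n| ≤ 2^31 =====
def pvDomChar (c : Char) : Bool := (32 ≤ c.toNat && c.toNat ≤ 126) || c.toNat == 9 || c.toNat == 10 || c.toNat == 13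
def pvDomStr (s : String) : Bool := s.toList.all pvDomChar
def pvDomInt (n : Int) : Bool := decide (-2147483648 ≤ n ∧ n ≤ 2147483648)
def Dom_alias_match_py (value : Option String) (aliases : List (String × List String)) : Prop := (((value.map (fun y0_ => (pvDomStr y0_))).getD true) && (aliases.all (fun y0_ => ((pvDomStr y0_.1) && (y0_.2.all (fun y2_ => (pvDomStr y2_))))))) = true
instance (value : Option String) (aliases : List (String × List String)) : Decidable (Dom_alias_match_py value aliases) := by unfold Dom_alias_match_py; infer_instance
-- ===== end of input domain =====

-- B drops the flatten + stable sort by descending alias length and instead keeps the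
-- longest matching alias in one linear pass (strict '>' keeps the stable tie-break);
-- objective: simpler.

-- ===== PORT A =====
-- the 'for canonical, alias in flat: if alias in text: return canonical' loop
def amFirstHit (text : String) : List (String × String) → Option String
  | [] => none
  | (c, a) :: rest => if PySem.Str.isIn a text then some c else amFirstHit text rest

def alias_match_py (value : Option String) (aliases : List (String × List String)) : Option String :=
  match value with
  | none => none
  | some v =>
    let text := PySem.Str.lower v
    let flat := PySem.List.sorted
      (aliases.flatMap (fun ca => ca.2.map (fun al => (ca.1, al))))
      (fun pa => -(PySem.Str.len pa.2))
    amFirstHit text flat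

-- ===== PORT B =====
def alias_match_py_alt (value : Option String) (aliases : List (String × List String)) : Option String :=
  match value with
  | none => none
  | some v =>
    let text := PySem.Str.lower v
    let best := aliases.foldl (fun st ca =>
        ca.2.foldl (fun st al =>
          if PySem.Str.isIn al text && PySem.Str.len al > st.2
          then (some ca.1, PySem.Str.len al) else st) st)
      ((none : Option String), (-1 : Int))
    best.1

-- ===== PRECONDITION & SPEC =====
-- Pre_ excludes association lists with duplicate canonical keys: they do not represent
-- any Python dict (Python collapses duplicate keys before _alias_match ever runs), so
-- no input A returns on is excluded.
def Pre_alias_match_py (value : Option String) (aliases : List (String × List String)) : Prop :=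
  (aliases.map Prod.fst).Nodup

instance (value : Option String) (aliases : List (String × List String)) : Decidable (Pre_alias_match_py value aliases) := by unfold Pre_alias_match_py; infer_instance

def pvWitness_alias_match_py : Option String × (List (String × List String)) :=
  (some "He goes strictly by-the-book here",
   [("by_book", ["by-the-book", "book"]), ("casual", ["chill", "laid-back"])])

def Spec_alias_match_py (value : Option String) (aliases : List (String × List String)) (out : Option String) : Prop := out = alias_match_py_alt value aliases
instance (value : Option String) (aliases : List (String × List String)) (out : Option String) : Decidable (Spec_alias_match_py value aliases out) := by unfold Spec_alias_match_py; infer_instance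

-- ===== CLAIM (what is proved, stated in full; the proofs are below) =====
def Claim_equal_alias_match_py : Prop := ∀ (value : Option String) (aliases : List (String × List String)), Dom_alias_match_py value aliases → Pre_alias_match_py value aliases → Spec_alias_match_py value aliases (alias_match_py value aliases)

-- ===== LEMMAS AND PROOFS =====

-- A's scanning loop is find? projected to the canonical key
theorem amFirstHit_eq_find? (text : String) (l : List (String × String)) :
    amFirstHit text l = (l.find? (fun p => PySem.Str.isIn p.2 text)).map Prod.fst := by
  induction l with
  | nil => rfl
  | cons p rest ih =>
    obtain ⟨c, a⟩ := p
    cases h : PySem.Str.isIn a text with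
    | true =>
      rw [List.find?_cons_of_pos (by simpa using h)]
      simp only [amFirstHit, h, if_true, Option.map_some]
    | false =>
      rw [List.find?_cons_of_neg (by simpa using h)]
      simp only [amFirstHit, h, Bool.false_eq_true, if_false, ih]

-- insertBy is invisible to find? when the inserted element does not match
theorem find?_insertBy_not_match {α : Type} (bef : α → α → Bool) (m : α → Bool) (x : α)
    (s : List α) (hx : m x = false) :
    (PySem.List.insertBy bef x s).find? m = s.find? m := by
  induction s with
  | nil => simp [PySem.List.insertBy, List.find?, hx]
  | cons y ys ih =>
    by_cases hb : bef x y = true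
    · simp [PySem.List.insertBy, hb, List.find?, hx]
    · by_cases hy : m y = true <;>
        simp [PySem.List.insertBy, hb, List.find?, hx, hy, ih]

-- inserting a matching element into an all-non-matching list: it becomes the first hit
theorem find?_insertBy_all_not_match {α : Type} (bef : α → α → Bool) (m : α → Bool) (x : α)
    (s : List α) (hall : ∀ y ∈ s, m y = false) (hx : m x = true) :
    (PySem.List.insertBy bef x s).find? m = some x := by
  induction s with
  | nil => simp [PySem.List.insertBy, List.find?, hx]
  | cons y ys ih =>
    have hy : m y = false := hall y (by simp)
    by_cases hb : bef x y = true
    · simp [PySem.List.insertBy, hb, List.find?, hx]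
    · simp [PySem.List.insertBy, hb, List.find?, hy]
      exact ih (fun z hz => hall z (by simp [hz]))

-- inserting a matching element into a key-ascending list whose first hit is p:
-- it takes the lead exactly when its key is strictly smaller
theorem find?_insertBy_match {α : Type} (key : α → Int) (m : α → Bool) (x p : α)
    (s : List α) (hx : m x = true) (hp : s.find? m = some p)
    (hsort : s.Pairwise (fun a b => key a ≤ key b)) :
    (PySem.List.insertBy (fun a b => decide (key a < key b)) x s).find? m =
      if key x < key p then some x else some p := by
  induction s with
  | nil => simp [List.find?] at hp
  | cons y ys ih =>
    have hsort' := (List.pairwise_cons.mp hsort).2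
    have hy_le : ∀ z ∈ ys, key y ≤ key z := (List.pairwise_cons.mp hsort).1
    cases hy : m y with
    | true =>
      have hpy : y = p := by
        rw [List.find?_cons_of_pos hy] at hp
        exact Option.some.inj hp
      subst hpy
      by_cases hb : key x < key y
      · rw [if_pos hb]
        simp only [PySem.List.insertBy, if_pos (by simpa using hb : decide (key x < key y) = true)]
        exact List.find?_cons_of_pos hx
      · rw [if_neg hb]
        simp only [PySem.List.insertBy,
          if_neg (by simpa using hb : ¬ decide (key x < key y) = true)]
        exact List.find?_cons_of_pos hy
    | false =>
      have hp' : ys.find? m = some p := by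
        rwa [List.find?_cons_of_neg (by simpa using hy)] at hp
      have hpy : key y ≤ key p := hy_le p (List.mem_of_find?_eq_some hp')
      by_cases hb : key x < key y
      · have hxp : key x < key p := lt_of_lt_of_le hb hpy
        rw [if_pos hxp]
        simp only [PySem.List.insertBy, if_pos (by simpa using hb : decide (key x < key y) = true)]
        exact List.find?_cons_of_pos hx
      · simp only [PySem.List.insertBy,
          if_neg (by simpa using hb : ¬ decide (key x < key y) = true)]
        rw [List.find?_cons_of_neg (by simpa using hy)]
        exact ih hp' hsort'

-- one best-so-far step on the first hit of a key-ascending list = first hit after insertBy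
theorem bestStep (text : String) (x : String × String) (s : List (String × String))
    (hsort : s.Pairwise (fun a b => -(PySem.Str.len a.2) ≤ -(PySem.Str.len b.2))) :
    ((fun (st : Option String × Int) (p : String × String) =>
        if PySem.Str.isIn p.2 text && PySem.Str.len p.2 > st.2
        then (some p.1, PySem.Str.len p.2) else st)
      (match s.find? (fun p => PySem.Str.isIn p.2 text) with
        | none => ((none : Option String), (-1 : Int))
        | some p => (some p.1, PySem.Str.len p.2)) x) =
      (match (PySem.List.insertBy
          (fun a b => decide (-(PySem.Str.len a.2) < -(PySem.Str.len b.2))) x s).find?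
          (fun p => PySem.Str.isIn p.2 text) with
        | none => ((none : Option String), (-1 : Int))
        | some p => (some p.1, PySem.Str.len p.2)) := by
  have hlen : (0 : Int) ≤ PySem.Str.len x.2 := by simp [PySem.Str.len]
  cases hx : PySem.Str.isIn x.2 text with
  | false =>
    rw [find?_insertBy_not_match _ _ _ _ (by simpa using hx)]
    cases hfind : s.find? (fun p => PySem.Str.isIn p.2 text) with
    | none => simp only [hfind]; rw [if_neg (by rw [hx]; simp)]
    | some p => simp only [hfind]; rw [if_neg (by rw [hx]; simp)]
  | true =>
    cases hfind : s.find? (fun p => PySem.Str.isIn p.2 text) with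
    | none =>
      have hall : ∀ y ∈ s, PySem.Str.isIn y.2 text = false := by
        intro y hy; simpa using List.find?_eq_none.mp hfind y hy
      rw [find?_insertBy_all_not_match _ _ _ _ hall (by simpa using hx)]
      have hgt : PySem.Str.len x.2 > (-1 : Int) := by omega
      simp only [hfind]
      rw [if_pos (by rw [hx, decide_eq_true hgt]; rfl)]
    | some p =>
      have hrw := find?_insertBy_match (fun pa : String × String => -(PySem.Str.len pa.2))
        (fun p => PySem.Str.isIn p.2 text) x p s hx hfind hsort
      rw [hrw]
      simp only [hfind]
      by_cases hlt : -(PySem.Str.len x.2) < -(PySem.Str.len p.2)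
      · have hgt : PySem.Str.len x.2 > PySem.Str.len p.2 := by omega
        rw [if_pos hlt, if_pos (by rw [hx, decide_eq_true hgt]; rfl)]
      · have hng : ¬ (PySem.Str.len x.2 > PySem.Str.len p.2) := by omega
        rw [if_neg hlt, if_neg (by rw [hx]; simpa using hng)]

-- the single-pass best-so-far fold equals "first hit of the stable length-descending sort"
theorem bestFold_eq_sortedFirst (text : String) (f : List (String × String)) :
    f.foldl (fun st p =>
        if PySem.Str.isIn p.2 text && PySem.Str.len p.2 > st.2
        then (some p.1, PySem.Str.len p.2) else st) ((none : Option String), (-1 : Int)) =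
      (match (PySem.List.sorted f (fun pa => -(PySem.Str.len pa.2))).find?
          (fun p => PySem.Str.isIn p.2 text) with
        | none => ((none : Option String), (-1 : Int))
        | some p => (some p.1, PySem.Str.len p.2)) := by
  induction f using List.reverseRecOn with
  | nil => rfl
  | append_singleton f x ih =>
    have hsorted_step :
        PySem.List.sorted (f ++ [x]) (fun pa => -(PySem.Str.len pa.2)) =
          PySem.List.insertBy
            (fun a b => decide (-(PySem.Str.len a.2) < -(PySem.Str.len b.2))) x
            (PySem.List.sorted f (fun pa => -(PySem.Str.len pa.2))) := by
      rw [PySem.List.sorted_eq_foldl_insertBy (f ++ [x]), List.foldl_append, List.foldl_cons,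
        List.foldl_nil, ← PySem.List.sorted_eq_foldl_insertBy]
    rw [List.foldl_append, List.foldl_cons, List.foldl_nil, ih, hsorted_step]
    exact bestStep text x _ (PySem.List.sorted_pairwise f _)

-- ===== VERDICT (by name: the statement is the Claim_ definition above) =====
theorem alias_match_py_spec : Claim_equal_alias_match_py := by
  intro value aliases _ _
  unfold Spec_alias_match_py alias_match_py alias_match_py_alt
  cases value with
  | none => rfl
  | some v =>
    simp only
    rw [amFirstHit_eq_find?]
    have h1 : aliases.foldl (fun st ca =>
          ca.2.foldl (fun st al =>
            if PySem.Str.isIn al (PySem.Str.lower v) && PySem.Str.len al > st.2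
            then (some ca.1, PySem.Str.len al) else st) st)
          ((none : Option String), (-1 : Int))
        = (aliases.flatMap (fun ca => ca.2.map (fun al => (ca.1, al)))).foldl
            (fun st p =>
              if PySem.Str.isIn p.2 (PySem.Str.lower v) && PySem.Str.len p.2 > st.2
              then (some p.1, PySem.Str.len p.2) else st)
            ((none : Option String), (-1 : Int)) := by
      rw [List.foldl_flatMap]
      simp only [List.foldl_map]
    rw [h1, bestFold_eq_sortedFirst]
    cases hfind : (PySem.List.sorted
        (aliases.flatMap (fun ca => ca.2.map (fun al => (ca.1, al))))
        (fun pa => -(PySem.Str.len pa.2))).find?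
        (fun p => PySem.Str.isIn p.2 (PySem.Str.lower v)) <;> simp
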